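-- pv_equiv track=rewrite | github.com/felizchachacha/misc-scripts | teams.py | differentTeams
-- ===== SOURCE A (Python) =====
-- def differentTeams(skills):
--     skills = skills.strip()
--
--     skills_count = {
--         'p': 0,
--         'c': 0,
--         'm': 0,
--         'b': 0,
--         'z': 0,
--     }
--
--     for skill in skills_count.keys():
--         skills_count[skill] = skills.count(skill)
--     return min(skills_count.values())
-- ===== SOURCE B (Python) =====
-- def differentTeams(skills):
--     # Sort-then-scan: sort the relevant characters, then read off run lengths.
--     rel = sorted(ch for ch in skills.strip() if ch in 'pcmbz')
--     if any(s not in rel for s in 'pcmbz'):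
--         return 0
--     runs = []
--     i = 0
--     n = len(rel)
--     while i < n:
--         j = i
--         while j < n and rel[j] == rel[i]:
--             j += 1
--         runs.append(j - i)
--         i = j
--     return min(runs)
-- ===== Notes on version B (the rewrite author's own statement) =====
-- stated objective: alternative
-- what changed: B sorts the skill characters of the stripped string and reads the five counts off as run lengths of the sorted list (sort-then-scan), instead of A's five separate full-string .count scans collected in a dict.
import Mathlib
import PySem

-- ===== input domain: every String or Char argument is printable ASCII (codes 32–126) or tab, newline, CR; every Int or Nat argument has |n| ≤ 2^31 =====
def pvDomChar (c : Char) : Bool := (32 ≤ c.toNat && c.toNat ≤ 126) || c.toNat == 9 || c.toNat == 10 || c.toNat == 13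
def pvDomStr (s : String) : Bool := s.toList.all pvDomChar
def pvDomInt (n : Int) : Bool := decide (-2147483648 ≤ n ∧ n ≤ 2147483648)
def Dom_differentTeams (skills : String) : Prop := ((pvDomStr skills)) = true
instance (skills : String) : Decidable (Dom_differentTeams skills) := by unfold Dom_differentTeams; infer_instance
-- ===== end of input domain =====

-- B replaces A's five full-string .count scans by a sort-then-scan algorithm: sort the
-- relevant characters and read the five counts off as run lengths; alternative decomposition.

-- ===== PORT A =====
-- A: strip; dict p/c/m/b/z ↦ 0; for each key, dict[key] = stripped.count(key); min(values).
def differentTeams (skills : String) : Int :=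
  let s := PySem.Str.strip skills
  let skillsCount : PySem.Dict Char Int :=
    (((((PySem.Dict.empty.insert 'p' 0).insert 'c' 0).insert 'm' 0).insert 'b' 0).insert 'z' 0)
  let skillsCount :=
    skillsCount.keys.foldl
      (fun d skill => d.insert skill ((PySem.Str.count s (String.ofList [skill]) : Int))) skillsCount
  match PySem.List.min? skillsCount.values id with
  | some v => v
  | none => 0   -- unreachable: the dict always has five values (Python min would raise on empty)

-- ===== PORT B =====
-- B's inner while loops: from a sorted list, read off the run lengths (j - i per run).
def runsOfB : List Char → List Int
  | [] => []
  | a :: t =>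
      ((1 : Int) + (t.takeWhile (fun x => x = a)).length) :: runsOfB (t.dropWhile (fun x => x = a))
  termination_by l => l.length
  decreasing_by
    have := (List.dropWhile_sublist (l := t) (p := fun x => x = a)).length_le
    simp; omega

-- B: keep only the five skill characters of the stripped string ('ch in "pcmbz"' on a
-- single character = membership in the five chars, exact), sort them, return 0 if some
-- skill is absent, else the minimum run length.
def differentTeams_alt (skills : String) : Int :=
  let rel := PySem.List.sorted
    ((PySem.Str.strip skills).toList.filter (fun ch => ch ∈ ['p', 'c', 'm', 'b', 'z']))
    (fun x => x) false
  if ['p', 'c', 'm', 'b', 'z'].any (fun s => !(rel.contains s)) then 0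
  else
    match PySem.List.min? (runsOfB rel) (fun y => y) with
    | some v => v
    | none => 0   -- unreachable: all five skills present, so rel and its runs are nonempty

-- ===== PRECONDITION & SPEC =====
def Spec_differentTeams (skills : String) (out : Int) : Prop := out = differentTeams_alt skills
instance (skills : String) (out : Int) : Decidable (Spec_differentTeams skills out) := by unfold Spec_differentTeams; infer_instance

-- ===== CLAIM (what is proved, stated in full; the proofs are below) =====
def Claim_equal_differentTeams : Prop := ∀ (skills : String), Dom_differentTeams skills → Spec_differentTeams skills (differentTeams skills)

-- ===== LEMMAS AND PROOFS =====

-- Chars.count with a single-character needle is List.count.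
theorem chars_count_go_singleton (c : Char) :
    ∀ (fuel : Nat) (l : List Char) (acc : Nat), l.length ≤ fuel →
      PySem.Chars.count.go [c] fuel l acc = acc + l.count c := by
  intro fuel
  induction fuel with
  | zero =>
    intro l acc h
    cases l with
    | nil => simp [PySem.Chars.count.go]
    | cons hd tl => simp at h
  | succ n ih =>
    intro l acc h
    cases l with
    | nil => simp [PySem.Chars.count.go]
    | cons hd tl =>
      simp only [PySem.Chars.count.go]
      by_cases hc : hd = c
      · subst hc
        simp [List.isPrefixOf, ih tl (acc + 1) (by simpa using h)]
        omega
      · have : List.isPrefixOf [c] (hd :: tl) = false := by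
          simp [List.isPrefixOf]; exact fun h' => (hc h'.symm).elim
        simp [this, ih tl acc (by simpa using h), hc]

theorem chars_count_singleton (s : List Char) (c : Char) :
    PySem.Chars.count s [c] = s.count c := by
  simpa [PySem.Chars.count] using chars_count_go_singleton c s.length s 0 le_rfl

-- Python's min over the five collected dict values as a min chain.
theorem min5_eq (a b c d e : Int) :
    PySem.List.min? [a, b, c, d, e] id = some (min a (min b (min c (min d e)))) := by
  rw [show (id : Int → Int) = fun y => y from rfl, PySem.List.min?_id_cons]
  simp [List.foldl, min_assoc]

-- A's value is the min chain of the five counts of the stripped string.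
theorem a_val (skills : String) :
    differentTeams skills =
      min (((PySem.Str.strip skills).toList.count 'p' : Int))
        (min (((PySem.Str.strip skills).toList.count 'c' : Int))
          (min (((PySem.Str.strip skills).toList.count 'm' : Int))
            (min (((PySem.Str.strip skills).toList.count 'b' : Int))
              (((PySem.Str.strip skills).toList.count 'z' : Int))))) := by
  unfold differentTeams
  simp [PySem.Dict.empty, PySem.Dict.insert, PySem.Dict.keys, PySem.Dict.values,
        min5_eq, PySem.Str.count_eq, chars_count_singleton, PySem.Str.toList_strip]

-- Membership in runsOfB of a ≤-sorted list is exactly "count of some member".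
theorem mem_runsOfB (l : List Char) (hl : l.Pairwise (· ≤ ·)) (k : Int) :
    k ∈ runsOfB l ↔ ∃ c, c ∈ l ∧ (l.count c : Int) = k := by
  induction l using runsOfB.induct with
  | case1 => simp [runsOfB]
  | case2 a t ih =>
    have hsplit : t.takeWhile (fun x => x = a) ++ t.dropWhile (fun x => x = a) = t :=
      List.takeWhile_append_dropWhile
    have ht1 : ∀ x ∈ t.takeWhile (fun x => x = a), x = a := by
      intro x hx
      simpa using List.mem_takeWhile_imp hx
    have ht2 : ∀ x ∈ t.dropWhile (fun x => x = a), x ≠ a := by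
      cases h2 : t.dropWhile (fun x => x = a) with
      | nil => simp
      | cons b u =>
        have hba : ¬ (b = a) := by
          have := List.head?_dropWhile_not (p := fun x => x = a) t
          simp [h2] at this; exact this
        have hat : ∀ y ∈ t, a ≤ y := (List.pairwise_cons.mp hl).1
        have hab : a < b := by
          have hbt : b ∈ t := by
            have : b ∈ t.dropWhile (fun x => x = a) := by simp [h2]
            exact (List.dropWhile_sublist _).subset this
          exact lt_of_le_of_ne (hat b hbt) (fun h => hba h.symm)
        have hpt2 : (b :: u).Pairwise (· ≤ ·) := by
          rw [← h2]
          exact (List.Pairwise.sublist (List.dropWhile_sublist _) (List.pairwise_cons.mp hl).2)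
        intro x hx
        rcases List.mem_cons.mp hx with hx | hx
        · exact fun h => hba (hx ▸ h)
        · intro h
          have : b ≤ x := (List.pairwise_cons.mp hpt2).1 x hx
          exact absurd (h ▸ this) (not_le.mpr hab)
    have hpt2 : (t.dropWhile (fun x => x = a)).Pairwise (· ≤ ·) :=
      List.Pairwise.sublist (List.dropWhile_sublist _) (List.pairwise_cons.mp hl).2
    have hcount_a : (a :: t).count a = 1 + (t.takeWhile (fun x => x = a)).length := by
      have : t.count a = (t.takeWhile (fun x => x = a)).count a +
          (t.dropWhile (fun x => x = a)).count a := by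
        conv_lhs => rw [← hsplit]
        rw [List.count_append]
      have h1 : (t.takeWhile (fun x => x = a)).count a =
          (t.takeWhile (fun x => x = a)).length := by
        apply List.count_eq_length.mpr
        intro x hx; exact ((ht1 x hx).symm)
      have h2 : (t.dropWhile (fun x => x = a)).count a = 0 := by
        apply List.count_eq_zero.mpr
        intro hmem; exact (ht2 a hmem) rfl
      simp [List.count_cons_self, this, h1, h2]; omega
    have hcount_t2 : ∀ c ∈ t.dropWhile (fun x => x = a),
        (a :: t).count c = (t.dropWhile (fun x => x = a)).count c := by
      intro c hc
      have hca : c ≠ a := ht2 c hc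
      have : t.count c = (t.takeWhile (fun x => x = a)).count c +
          (t.dropWhile (fun x => x = a)).count c := by
        conv_lhs => rw [← hsplit]
        rw [List.count_append]
      have h1 : (t.takeWhile (fun x => x = a)).count c = 0 := by
        apply List.count_eq_zero.mpr
        intro hmem; exact hca (ht1 c hmem)
      simp [this, h1, Ne.symm hca]
    rw [runsOfB]
    constructor
    · intro hk
      rcases List.mem_cons.mp hk with hk | hk
      · exact ⟨a, by simp, by rw [hcount_a]; push_cast; omega⟩
      · rcases (ih hpt2).mp hk with ⟨c, hc, hck⟩
        refine ⟨c, List.mem_cons_of_mem a ((List.dropWhile_sublist _).subset hc), ?_⟩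
        rw [hcount_t2 c hc]; exact hck
    · rintro ⟨c, hc, hck⟩
      by_cases hca : c = a
      · subst hca
        refine List.mem_cons.mpr (Or.inl ?_)
        rw [hcount_a] at hck; push_cast at hck ⊢; omega
      · have hct : c ∈ t := by
          rcases List.mem_cons.mp hc with h | h
          · exact absurd h hca
          · exact h
        have hct2 : c ∈ t.dropWhile (fun x => x = a) := by
          rw [← hsplit] at hct
          rcases List.mem_append.mp hct with h | h
          · exact absurd (ht1 c h) hca
          · exact h
        refine List.mem_cons.mpr (Or.inr ?_)
        exact (ih hpt2).mpr ⟨c, hct2, by rw [← hcount_t2 c hct2]; exact hck⟩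

-- ===== VERDICT (by name: the statement is the Claim_ definition above) =====
set_option maxHeartbeats 1000000 in
theorem differentTeams_spec : Claim_equal_differentTeams := by
  intro skills _
  unfold Spec_differentTeams
  rw [a_val]
  unfold differentTeams_alt
  set s := (PySem.Str.strip skills).toList with hs
  set keys : List Char := ['p', 'c', 'm', 'b', 'z'] with hkeys
  set L := s.filter (fun ch => ch ∈ keys) with hL
  set rel := PySem.List.sorted L (fun x => x) false with hrel
  have hperm : rel.Perm L := PySem.List.sorted_perm L (fun x => x) false
  have hpair : rel.Pairwise (· ≤ ·) := by
    simpa using PySem.List.sorted_pairwise (xs := L) (key := fun x => x)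
  have hcnt : ∀ c ∈ keys, rel.count c = s.count c := by
    intro c hc
    rw [hperm.count_eq, hL, List.count_filter (by simp [hkeys] at hc ⊢; tauto)]
  simp only
  split_ifs with hmiss
  · -- some skill is missing: its count in s is 0, so A's min chain is 0
    simp only [List.any_eq_true, Bool.not_eq_eq_eq_not, Bool.not_true,
      List.contains_eq_mem, decide_eq_false_iff_not] at hmiss
    rcases hmiss with ⟨c, hck, hcnot⟩
    have h0 : s.count c = 0 := by
      rw [← hcnt c (by simpa [hkeys] using hck)]
      exact List.count_eq_zero.mpr hcnot
    have hck' : c = 'p' ∨ c = 'c' ∨ c = 'm' ∨ c = 'b' ∨ c = 'z' := by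
      simpa [hkeys] using hck
    have hnn : ∀ d : Char, (0 : Int) ≤ (s.count d : Int) := fun d => Int.natCast_nonneg _
    rcases hck' with h | h | h | h | h <;> subst h <;>
      · rw [h0] ; push_cast
        have := hnn 'p'; have := hnn 'c'; have := hnn 'm'; have := hnn 'b'; have := hnn 'z'
        omega
  · -- all five skills present
    simp only [List.any_eq_true, Bool.not_eq_eq_eq_not, Bool.not_true,
      List.contains_eq_mem, decide_eq_false_iff_not, not_exists, not_and, not_not] at hmiss
    have hmem : ∀ c ∈ keys, c ∈ rel := by
      intro c hc; exact hmiss c (by simpa [hkeys] using hc)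
    have hrelne : rel ≠ [] := by
      intro h; exact absurd (hmem 'p' (by simp [hkeys])) (by simp [h])
    have hrunsne : runsOfB rel ≠ [] := by
      cases hr : rel with
      | nil => exact absurd hr hrelne
      | cons a t => simp [runsOfB]
    have hsome : PySem.List.min? (runsOfB rel) (fun y => y) ≠ none := by
      simp only [ne_eq, PySem.List.min?_eq_none_iff]; exact hrunsne
    obtain ⟨m, hm⟩ := Option.ne_none_iff_exists'.mp hsome
    rw [hm]
    simp only []
    -- m is a run length, i.e. the count of some member of rel, which is one of the keys
    have hmmem : m ∈ runsOfB rel := PySem.List.min?_mem hm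
    rcases (mem_runsOfB rel hpair m).mp hmmem with ⟨c, hcrel, hcm⟩
    have hckeys : c ∈ keys := by
      have := hperm.mem_iff.mp hcrel
      rw [hL] at this
      exact (List.mem_filter.mp this).2 |> (by simpa using ·)
    have hcm' : (s.count c : Int) = m := by
      rw [← hcnt c hckeys]; exact hcm
    -- m is ≤ every key's count
    have hle : ∀ c' ∈ keys, m ≤ (s.count c' : Int) := by
      intro c' hc'
      have : ((rel.count c' : Int)) ∈ runsOfB rel :=
        (mem_runsOfB rel hpair _).mpr ⟨c', hmem c' hc', rfl⟩
      have := PySem.List.min?_isMin hm _ this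
      simpa [hcnt c' hc'] using this
    have h1 := hle 'p' (by simp [hkeys]); have h2 := hle 'c' (by simp [hkeys])
    have h3 := hle 'm' (by simp [hkeys]); have h4 := hle 'b' (by simp [hkeys])
    have h5 := hle 'z' (by simp [hkeys])
    have hck' : c = 'p' ∨ c = 'c' ∨ c = 'm' ∨ c = 'b' ∨ c = 'z' := by
      simpa [hkeys] using hckeys
    rcases hck' with h | h | h | h | h <;> subst h <;> rw [← hcm'] <;> omega
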